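-- pv_equiv track=rewrite | github.com/Ajit-53/Google-foobar2k20 | Level 2/lovely_lucky_lambs/answer.py | solution
-- ===== SOURCE A (Python) =====
-- def solution(total_lambs):
--
--     if total_lambs >= 10**9:
--         return 0
--     doubledList=[]
--     x=0
--     runningtotal=0
--     while x<= total_lambs:
--         currentvalue=2**x
--         doubledList.append(currentvalue)
--         runningtotal=runningtotal + currentvalue
--         if runningtotal > total_lambs:
--             break
--         x=x+1
--
--     fiblist=[1,1]
--     fibrunningtotal=2
--     y=2
--     while y<= total_lambs:
--         value=fiblist[y-1] + fiblist[y-2]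
--         fiblist.append(value)
--         fibrunningtotal=fibrunningtotal + int(fiblist[y])
--         if fibrunningtotal > total_lambs:
--             break
--         y=y+1
--
--     answer = len(fiblist) - len(doubledList)
--
--     return abs(answer)
-- ===== SOURCE B (Python) =====
-- def solution(total_lambs):
--     if total_lambs >= 10**9:
--         return 0
--     # doubling count in closed form: smallest n with 2^n - 1 > total_lambs
--     doubled = 0 if total_lambs < 0 else (total_lambs + 1).bit_length()
--     # Fibonacci count with a rolling pair instead of a growing list
--     count, running, prev, cur = 2, 2, 1, 1
--     while running <= total_lambs:
--         prev, cur = cur, prev + cur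
--         running += cur
--         count += 1
--     return abs(count - doubled)
-- ===== Notes on version B (the rewrite author's own statement) =====
-- stated objective: simpler
-- what changed: B replaces A's list-building doubling loop by the closed form (total_lambs+1).bit_length() and A's growing Fibonacci list (with repeated indexing) by a rolling pair of variables, returning abs(count - doubled).
import Mathlib
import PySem

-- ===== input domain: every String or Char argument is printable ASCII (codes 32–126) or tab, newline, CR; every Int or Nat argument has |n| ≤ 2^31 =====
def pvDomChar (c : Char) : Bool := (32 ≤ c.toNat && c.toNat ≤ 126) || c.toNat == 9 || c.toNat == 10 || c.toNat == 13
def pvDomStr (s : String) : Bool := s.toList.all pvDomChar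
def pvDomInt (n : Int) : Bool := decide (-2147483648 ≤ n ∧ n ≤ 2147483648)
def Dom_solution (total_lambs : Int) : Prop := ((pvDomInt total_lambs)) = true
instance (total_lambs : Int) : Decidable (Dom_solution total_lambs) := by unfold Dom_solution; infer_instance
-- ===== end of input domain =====

-- B replaces A's power-of-two list building by a closed-form bit_length and the
-- growing Fibonacci list by a rolling pair of variables (objective: simpler).

-- ===== PORT A =====
-- first while loop of A: x counts up, doubledList grows, runningtotal accumulates;
-- x is always ≥ 0 in Python (starts at 0, only incremented), so 2**x is ported as 2 ^ x.toNat
def aDoubleLoop (total x : Int) (lst : List Int) (rt : Int) : List Int :=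
  if _h : x ≤ total then
    let cv : Int := 2 ^ x.toNat
    let lst' := lst ++ [cv]
    let rt' := rt + cv
    if rt' > total then lst'
    else aDoubleLoop total (x + 1) lst' rt'
  else lst
termination_by (total + 1 - x).toNat
decreasing_by omega

-- second while loop of A: fiblist[y-1], fiblist[y-2], fiblist[y] are always in range
-- when Python runs this loop, so the indexings are ported with pyGetD (default 0)
def aFibLoop (total y : Int) (fl : List Int) (frt : Int) : List Int :=
  if _h : y ≤ total then
    let value := PySem.List.pyGetD fl (y - 1) 0 + PySem.List.pyGetD fl (y - 2) 0
    let fl' := fl ++ [value]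
    let frt' := frt + PySem.List.pyGetD fl' y 0
    if frt' > total then fl'
    else aFibLoop total (y + 1) fl' frt'
  else fl
termination_by (total + 1 - y).toNat
decreasing_by omega

def solution (total_lambs : Int) : Int :=
  if total_lambs ≥ 10 ^ 9 then 0
  else
    let doubledList := aDoubleLoop total_lambs 0 [] 0
    let fiblist := aFibLoop total_lambs 2 [1, 1] 2
    let answer : Int := (fiblist.length : Int) - (doubledList.length : Int)
    |answer|

-- ===== PORT B =====
-- B's while loop: rolling pair (prev, cur); the positivity proofs only serve termination
def bFibCount (total count running prev cur : Int)
    (hp : 1 ≤ prev) (hc : 1 ≤ cur) : Int :=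
  if _h : running ≤ total then
    bFibCount total (count + 1) (running + (prev + cur)) cur (prev + cur) hc (by omega)
  else count
termination_by (total + 1 - running).toNat
decreasing_by omega

def solution_alt (total_lambs : Int) : Int :=
  if total_lambs ≥ 10 ^ 9 then 0
  else
    let doubled : Int := if total_lambs < 0 then 0
      else (PySem.Int.bitLength (total_lambs + 1) : Int)
    let count := bFibCount total_lambs 2 2 1 1 (by omega) (by omega)
    |count - doubled|

-- ===== PRECONDITION & SPEC =====
def Spec_solution (total_lambs : Int) (out : Int) : Prop := out = solution_alt total_lambs
instance (total_lambs : Int) (out : Int) : Decidable (Spec_solution total_lambs out) := by unfold Spec_solution; infer_instance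

-- ===== CLAIM (what is proved, stated in full; the proofs are below) =====
def Claim_equal_solution : Prop := ∀ (total_lambs : Int), Dom_solution total_lambs → Spec_solution total_lambs (solution total_lambs)

-- ===== LEMMAS AND PROOFS =====

-- A's doubling loop: from a state with rt = 2^x - 1 ≤ total, the final list length
-- is bit_length (total + 1) (the smallest n with 2^n - 1 > total).
theorem aDoubleLoop_length (total x : Int) (lst : List Int) (rt : Int)
    (ht : 0 ≤ total) (hx : 0 ≤ x) (hlen : (lst.length : Int) = x)
    (hrt : rt = 2 ^ x.toNat - 1) (hle : rt ≤ total) :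
    ((aDoubleLoop total x lst rt).length : Int) = (PySem.Int.bitLength (total + 1) : Int) := by
  have hpow : (x.toNat : Int) < 2 ^ x.toNat := by
    exact_mod_cast Nat.lt_two_pow_self
  have hxt : x ≤ total := by
    have : x = (x.toNat : Int) := by omega
    omega
  rw [aDoubleLoop, dif_pos hxt]
  simp only
  split_ifs with hbr
  · -- break: 2^x ≤ total+1 < 2^(x+1); bitLength (total+1) = x.toNat + 1
    have h1 : (2 ^ x.toNat : Int) ≤ total + 1 := by omega
    have h2 : total + 1 < 2 ^ (x.toNat + 1) := by
      have : (2 ^ (x.toNat + 1) : Int) = 2 ^ x.toNat * 2 := by ring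
      omega
    have hm : ((total + 1).natAbs : Int) = total + 1 := by omega
    set L := PySem.Int.bitLength (total + 1) with hL
    have hlt : (total + 1).natAbs < 2 ^ L := PySem.Int.lt_two_pow_bitLength (total + 1)
    have hge : 2 ^ (L - 1) ≤ (total + 1).natAbs :=
      PySem.Int.two_pow_bitLength_le (total + 1) (by omega)
    have hc0 : ((2 ^ x.toNat : ℕ) : Int) = 2 ^ x.toNat := by push_cast; ring
    have hc1 : ((2 ^ (x.toNat + 1) : ℕ) : Int) = 2 ^ (x.toNat + 1) := by push_cast; ring
    have h1' : 2 ^ x.toNat ≤ (total + 1).natAbs := by omega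
    have h2' : (total + 1).natAbs < 2 ^ (x.toNat + 1) := by omega
    have hxl : x.toNat < L := by
      have : (2 : ℕ) ^ x.toNat < 2 ^ L := lt_of_le_of_lt h1' hlt
      exact (Nat.pow_lt_pow_iff_right (by omega)).mp this
    have hlx : L - 1 < x.toNat + 1 := by
      have : (2 : ℕ) ^ (L - 1) < 2 ^ (x.toNat + 1) := lt_of_le_of_lt hge h2'
      exact (Nat.pow_lt_pow_iff_right (by omega)).mp this
    have : L = x.toNat + 1 := by omega
    simp [this]
    omega
  · exact aDoubleLoop_length total (x + 1) (lst ++ [2 ^ x.toNat]) (rt + 2 ^ x.toNat)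
      ht (by omega) (by simp; omega)
      (by rw [hrt]; have : (x + 1).toNat = x.toNat + 1 := by omega
          rw [this]; ring)
      (by omega)
termination_by (total + 1 - x).toNat
decreasing_by omega

-- A's fib loop and B's rolling loop agree, under the evident coupling invariant.
theorem fib_loops_agree (total y : Int) (fl : List Int) (frt prev cur : Int)
    (hp : 1 ≤ prev) (hc : 1 ≤ cur)
    (hy : 2 ≤ y) (hlen : (fl.length : Int) = y) (hyf : y ≤ frt)
    (h2 : PySem.List.pyGetD fl (y - 2) 0 = prev)
    (h1 : PySem.List.pyGetD fl (y - 1) 0 = cur)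
    (hst : frt ≤ total ∨ frt = y) :
    ((aFibLoop total y fl frt).length : Int) = bFibCount total y frt prev cur hp hc := by
  rw [aFibLoop, bFibCount]
  by_cases hrun : frt ≤ total
  · have hyt : y ≤ total := le_trans hyf hrun
    rw [dif_pos hyt, dif_pos hrun]
    simp only [h1, h2]
    have hgety : PySem.List.pyGetD (fl ++ [cur + prev]) y 0 = cur + prev := by
      rw [← hlen, PySem.List.pyGetD_natCast]
      simp [List.getD]
    rw [hgety]
    have hval : cur + prev = prev + cur := by ring
    by_cases hbr : frt + (cur + prev) > total
    · rw [if_pos hbr, bFibCount, dif_neg (by omega)]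
      simp; omega
    · rw [if_neg hbr]
      have hg2' : PySem.List.pyGetD (fl ++ [cur + prev]) (y + 1 - 2) 0 = cur := by
        have hidx : y + 1 - 2 = ((fl.length - 1 : ℕ) : Int) := by omega
        rw [hidx, PySem.List.pyGetD_natCast]
        have hlt : fl.length - 1 < fl.length := by omega
        rw [List.getD_eq_getElem?_getD, List.getElem?_append_left hlt,
            ← List.getD_eq_getElem?_getD]
        have : PySem.List.pyGetD fl (y - 1) 0 = fl.getD (fl.length - 1) 0 := by
          have hidx2 : y - 1 = ((fl.length - 1 : ℕ) : Int) := by omega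
          rw [hidx2, PySem.List.pyGetD_natCast]
        rw [← this, h1]
      have hg1' : PySem.List.pyGetD (fl ++ [cur + prev]) (y + 1 - 1) 0 = cur + prev := by
        have : y + 1 - 1 = y := by ring
        rw [this, hgety]
      have := fib_loops_agree total (y + 1) (fl ++ [cur + prev]) (frt + (cur + prev))
        cur (cur + prev) hc (by omega) (by omega) (by simp; omega) (by omega)
        hg2' hg1' (Or.inl (by omega))
      rw [this]
      congr 1
      omega
  · -- B stops; A's entry condition fails too since frt = y here
    have hfy : frt = y := by tauto
    rw [dif_neg (by omega), dif_neg hrun]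
    omega
termination_by (total + 1 - y).toNat
decreasing_by omega

-- ===== VERDICT (by name: the statement is the Claim_ definition above) =====
theorem solution_spec : Claim_equal_solution := by
  intro t _
  unfold Spec_solution solution solution_alt
  by_cases hbig : t ≥ 10 ^ 9
  · rw [if_pos hbig, if_pos hbig]
  · rw [if_neg hbig, if_neg hbig]
    simp only
    by_cases hneg : t < 0
    · rw [aDoubleLoop, dif_neg (by omega), aFibLoop, dif_neg (by omega),
          bFibCount, dif_neg (by omega), if_pos hneg]
      norm_num
    · have hneg' : 0 ≤ t := by omega
      rw [if_neg (by omega)]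
      have hd := aDoubleLoop_length t 0 [] 0 hneg' (by omega) (by simp) (by decide) (by omega)
      have hf := fib_loops_agree t 2 [1, 1] 2 1 1 (by omega) (by omega) (by omega)
        (by decide) (by omega) (by decide) (by decide) (Or.inr rfl)
      rw [hd, hf]
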